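-- pv_equiv track=rewrite | github.com/Merricx/blasto | modules/cipher/grille.py | determine_key
-- ===== SOURCE A (Python) =====
-- def determine_key(size):
--
-- 	total_square = (size*size)-1
-- 	max_row  = size-1
-- 	key_count = 0
-- 	all_key = []
--
-- 	count = 0
-- 	val1 = 0
-- 	val3 = total_square
-- 	addition = 2
-- 	while max_row >= 1:
-- 		val2 = max_row + val1
-- 		val4 = val3 - max_row
-- 		for i in range(max_row):
-- 			all_key.append([])
-- 			all_key[count].append(val1)
-- 			all_key[count].append(val2)
-- 			all_key[count].append(val3)
-- 			all_key[count].append(val4)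
-- 			count += 1
-- 			val1 += 1
-- 			val2 += size
-- 			val3 -= 1
-- 			val4 -= size
-- 		max_row -= 2
-- 		val1 += addition
-- 		val3 -= addition
-- 		addition += 2
--
-- 	return all_key
-- ===== SOURCE B (Python) =====
-- def determine_key(size):
--     if size < 1:
--         return []
--     n = size
--     n1 = n - 1
--     keys = []
--     for idx in range(n * n):
--         r, c = divmod(idx, n)
--         r90 = c * n + n1 - r
--         if idx < r90:
--             r180 = (n1 - r) * n + n1 - c
--             if idx < r180:
--                 r270 = (n1 - c) * n + r
--                 if idx < r270:
--                     keys.append([idx, r90, r180, r270])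
--     return keys
-- ===== Notes on version B (the rewrite author's own statement) =====
-- stated objective: simpler
-- what changed: Replaces A's while-loop walk over concentric rings with six hand-threaded incremental counters (val1..val4, addition, count) by a single flat scan of all size*size cell indices that computes each cell's quarter-turn rotation orbit via divmod and keeps a cell exactly when it is the strict minimum of its orbit.
import Mathlib
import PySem

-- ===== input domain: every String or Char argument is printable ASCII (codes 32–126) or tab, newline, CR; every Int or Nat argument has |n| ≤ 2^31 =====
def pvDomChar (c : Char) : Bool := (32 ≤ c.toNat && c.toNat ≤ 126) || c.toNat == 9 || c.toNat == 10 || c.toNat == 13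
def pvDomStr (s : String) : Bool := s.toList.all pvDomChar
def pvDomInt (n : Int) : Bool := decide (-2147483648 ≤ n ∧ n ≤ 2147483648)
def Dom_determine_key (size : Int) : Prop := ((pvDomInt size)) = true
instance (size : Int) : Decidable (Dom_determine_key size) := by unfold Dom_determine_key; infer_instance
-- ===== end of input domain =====

-- B replaces A's incremental while-loop walk over concentric rings by a single flat scan of all
-- size*size cells that keeps a cell iff it is the strict minimum of its quarter-turn rotation
-- orbit (computed by divmod); objective: simpler.

-- ===== PORT A =====
-- Python's 'all_key.append([])' followed by four appends into all_key[count] (always the last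
-- element) is transliterated as appending the four-element list in one step; 'count' is threaded
-- exactly as in the source. 'key_count = 0' is dead in the source and omitted.
def determine_key_whileA (size max_row val1 val3 addition : Int)
    (all_key : List (List Int)) (count : Int) : List (List Int) :=
  if h : 1 ≤ max_row then
    let val2 := max_row + val1
    let val4 := val3 - max_row
    let s := (PySem.List.pyRange 0 max_row 1).foldl
      (fun (st : List (List Int) × Int × Int × Int × Int × Int) _i =>
        (st.1 ++ [[st.2.2.1, st.2.2.2.1, st.2.2.2.2.1, st.2.2.2.2.2]],
         st.2.1 + 1, st.2.2.1 + 1, st.2.2.2.1 + size, st.2.2.2.2.1 - 1, st.2.2.2.2.2 - size))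
      (all_key, count, val1, val2, val3, val4)
    determine_key_whileA size (max_row - 2) (s.2.2.1 + addition) (s.2.2.2.2.1 - addition)
      (addition + 2) s.1 s.2.1
  else all_key
termination_by max_row.toNat
decreasing_by omega

def determine_key (size : Int) : List (List Int) :=
  determine_key_whileA size (size - 1) 0 (size * size - 1) 2 [] 0

-- ===== PORT B =====
-- the loop body of Source B (r, c = divmod(idx, n); short-circuit orbit-minimum test)
def pvBodyB (n : Int) (keys : List (List Int)) (idx : Int) : List (List Int) :=
  let n1 := n - 1
  let r := PySem.Int.floordiv idx n
  let c := PySem.Int.mod idx n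
  let r90 := c * n + n1 - r
  if idx < r90 then
    let r180 := (n1 - r) * n + n1 - c
    if idx < r180 then
      let r270 := (n1 - c) * n + r
      if idx < r270 then keys ++ [[idx, r90, r180, r270]] else keys
    else keys
  else keys

def determine_key_alt (size : Int) : List (List Int) :=
  if size < 1 then []
  else (PySem.List.pyRange 0 (size * size) 1).foldl (pvBodyB size) []

-- ===== PRECONDITION & SPEC =====
def Spec_determine_key (size : Int) (out : List (List Int)) : Prop := out = determine_key_alt size
instance (size : Int) (out : List (List Int)) : Decidable (Spec_determine_key size out) := by unfold Spec_determine_key; infer_instance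

-- ===== CLAIM (what is proved, stated in full; the proofs are below) =====
def Claim_equal_determine_key : Prop := ∀ (size : Int), Dom_determine_key size → Spec_determine_key size (determine_key size)

-- ===== LEMMAS AND PROOFS =====

-- the quadruple A appends in ring k at inner index i (in A's own arithmetic form)
def pvQuad (n k : Int) (i : ℕ) : List Int :=
  [k * (n + 1) + i,
   (n - 1 - 2 * k) + k * (n + 1) + i * n,
   n * n - 1 - k * (n + 1) - i,
   n * n - 1 - k * (n + 1) - (n - 1 - 2 * k) - i * n]

-- canonical ring decomposition, ring k onward
def pvRings (n k : Int) : List (List Int) :=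
  if h : 1 ≤ n - 1 - 2 * k then
    ((List.range (n - 1 - 2 * k).toNat).map fun i => pvQuad n k i) ++ pvRings n (k + 1)
  else []
termination_by (n - 1 - 2 * k).toNat
decreasing_by omega

theorem pv_inner_fold (size : Int) (l : List Int)
    (acc : List (List Int)) (cnt v1 v2 v3 v4 : Int) :
    l.foldl
      (fun (st : List (List Int) × Int × Int × Int × Int × Int) _i =>
        (st.1 ++ [[st.2.2.1, st.2.2.2.1, st.2.2.2.2.1, st.2.2.2.2.2]],
         st.2.1 + 1, st.2.2.1 + 1, st.2.2.2.1 + size, st.2.2.2.2.1 - 1, st.2.2.2.2.2 - size))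
      (acc, cnt, v1, v2, v3, v4)
    = (acc ++ (List.range l.length).map
          (fun (i : ℕ) => [v1 + (i : Int), v2 + (i : Int) * size, v3 - (i : Int), v4 - (i : Int) * size]),
       cnt + l.length, v1 + l.length, v2 + l.length * size, v3 - l.length, v4 - l.length * size) := by
  induction l generalizing acc cnt v1 v2 v3 v4 with
  | nil => simp
  | cons x xs ih =>
    simp only [List.foldl_cons, List.length_cons]
    rw [ih]
    refine Prod.ext ?_ (Prod.ext (by push_cast; ring) (Prod.ext (by push_cast; ring)
      (Prod.ext (by push_cast; ring) (Prod.ext (by push_cast; ring) (by push_cast; ring)))))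
    show acc ++ [[v1, v2, v3, v4]] ++ _ = _
    rw [List.range_succ_eq_map, List.map_cons, List.map_map, List.append_assoc,
      List.singleton_append]
    congr 1
    congr 1
    · norm_num
    · apply List.map_congr_left
      intro i _
      simp only [Function.comp_apply]
      push_cast
      refine congrArg₂ _ (by ring) (congrArg₂ _ (by ring) (congrArg₂ _ (by ring)
        (congrArg₂ _ (by ring) rfl)))

theorem pv_whileA_eq (size : Int) (k : Int) (hk : 0 ≤ k)
    (acc : List (List Int)) (count : Int) :
    determine_key_whileA size (size - 1 - 2 * k) (k * (size + 1))
      (size * size - 1 - k * (size + 1)) (2 * (k + 1)) acc count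
    = acc ++ pvRings size k := by
  rw [determine_key_whileA, pvRings]
  by_cases h : 1 ≤ size - 1 - 2 * k
  · simp only [dif_pos h]
    rw [pv_inner_fold]
    have hlen : ((PySem.List.pyRange 0 (size - 1 - 2 * k) 1).length : Int) = size - 1 - 2 * k := by
      rw [PySem.List.length_pyRange_one]; omega
    have hlenN : (PySem.List.pyRange 0 (size - 1 - 2 * k) 1).length = (size - 1 - 2 * k).toNat := by
      omega
    have h1 : k * (size + 1) + ((PySem.List.pyRange 0 (size - 1 - 2 * k) 1).length : Int)
        + 2 * (k + 1) = (k + 1) * (size + 1) := by rw [hlen]; ring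
    have h3 : size * size - 1 - k * (size + 1)
        - ((PySem.List.pyRange 0 (size - 1 - 2 * k) 1).length : Int) - 2 * (k + 1)
        = size * size - 1 - (k + 1) * (size + 1) := by rw [hlen]; ring
    have hmr : size - 1 - 2 * k - 2 = size - 1 - 2 * (k + 1) := by ring
    simp only []
    rw [hmr, h1, h3]
    have e5 : (2 : Int) * (k + 1) + 2 = 2 * ((k + 1) + 1) := by ring
    rw [e5, pv_whileA_eq size (k + 1) (by omega), hlenN, List.append_assoc]
    rfl
  · simp only [dif_neg h]
    simp
termination_by (size - 1 - 2 * k).toNat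
decreasing_by omega

-- flatten of rows from k = pvRings from k
theorem pv_flat_rings (n : Int) (hn : 1 ≤ n) (m : ℕ) (k : ℕ) (hk : k + m = n.toNat) :
    ((List.range' k m).map
        (fun (r : ℕ) => (List.range (n - 1 - 2 * (r : Int)).toNat).map (fun i => pvQuad n (r : Int) i))).flatten
      = pvRings n k := by
  induction m generalizing k with
  | zero =>
    rw [pvRings]
    have : ¬ 1 ≤ n - 1 - 2 * (k : Int) := by omega
    simp [this]
  | succ m ih =>
    rw [List.range'_succ, List.map_cons, List.flatten_cons]
    rw [pvRings]
    by_cases h : 1 ≤ n - 1 - 2 * (k : Int)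
    · simp only [dif_pos h]
      have hih := ih (k + 1) (by omega)
      push_cast at hih ⊢
      rw [← hih]
    · simp only [dif_neg h]
      have h0 : (n - 1 - 2 * (k : Int)).toNat = 0 := by omega
      rw [h0]
      simp only [List.range_zero, List.map_nil, List.nil_append]
      rw [List.flatten_eq_nil_iff]
      intro l hl
      rw [List.mem_map] at hl
      obtain ⟨r, hr, hrl⟩ := hl
      rw [List.mem_range'] at hr
      obtain ⟨j, _, hj⟩ := hr
      have : (n - 1 - 2 * (r : Int)).toNat = 0 := by omega
      rw [← hrl, this]
      simp

-- one row of orbit representatives = ring r of pvRings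
theorem pv_row_map (n : Int) (r : Int) (hr : 0 ≤ r) :
    (PySem.List.pyRange r (n - 1 - r) 1).map
        (fun c => [r * n + c, c * n + (n - 1 - r), (n - 1 - r) * n + (n - 1 - c),
          (n - 1 - c) * n + r])
      = (List.range (n - 1 - 2 * r).toNat).map (fun i => pvQuad n r i) := by
  rw [PySem.List.pyRange_one]
  have hlen : (n - 1 - r - r).toNat = (n - 1 - 2 * r).toNat := by omega
  rw [hlen, List.map_map]
  apply List.map_congr_left
  intro i _
  simp only [Function.comp_apply, pvQuad]
  refine congrArg₂ _ (by ring) (congrArg₂ _ (by ring) (congrArg₂ _ (by ring)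
    (congrArg₂ _ (by ring) rfl)))

-- ---- B-side lemmas ----

abbrev pvP (n idx : Int) : Prop :=
  let n1 := n - 1
  let r := PySem.Int.floordiv idx n
  let c := PySem.Int.mod idx n
  idx < c * n + n1 - r ∧ idx < (n1 - r) * n + n1 - c ∧ idx < (n1 - c) * n + r

def pvF (n idx : Int) : List Int :=
  let n1 := n - 1
  let r := PySem.Int.floordiv idx n
  let c := PySem.Int.mod idx n
  [idx, c * n + n1 - r, (n1 - r) * n + n1 - c, (n1 - c) * n + r]

theorem pvBodyB_eq (n : Int) (keys : List (List Int)) (idx : Int) :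
    pvBodyB n keys idx = if pvP n idx then keys ++ [pvF n idx] else keys := by
  simp only [pvBodyB, pvF, pvP]
  split_ifs <;> first | rfl | (exfalso; tauto)

theorem pv_fold_filterB (n : Int) (l : List Int) (acc : List (List Int)) :
    l.foldl (pvBodyB n) acc
      = acc ++ (l.filter (fun idx => decide (pvP n idx))).map (pvF n) := by
  induction l generalizing acc with
  | nil => simp
  | cons x xs ih =>
    rw [List.foldl_cons, pvBodyB_eq, List.filter_cons]
    by_cases h : pvP n x
    · rw [if_pos h, ih, if_pos (by simpa using h)]
      simp [List.append_assoc]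
    · rw [if_neg h, ih, if_neg (by simpa using h)]

-- sign-split of k*n < e for |e| < n
theorem pv_mul_lt_small (k e n : Int) (hn : 1 ≤ n) (he1 : -n < e) (he2 : e < n) :
    k * n < e ↔ k < 0 ∨ (k = 0 ∧ 0 < e) := by
  constructor
  · intro h
    rcases lt_trichotomy k 0 with h' | h' | h'
    · exact Or.inl h'
    · exact Or.inr ⟨h', by simpa [h'] using h⟩
    · exfalso; nlinarith
  · rintro (h' | ⟨h1, h2⟩)
    · nlinarith
    · simpa [h1] using h2

-- divmod on a cell of row r
theorem pv_divmod (n r c : Int) (hn : 1 ≤ n) (hr : 0 ≤ r) (hc1 : 0 ≤ c) (hc2 : c < n) :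
    PySem.Int.floordiv (r * n + c) n = r ∧ PySem.Int.mod (r * n + c) n = c := by
  have hd : PySem.Int.floordiv (r * n + c) n = r := by
    rw [PySem.Int.floordiv_eq_iff_of_pos (by omega)]
    constructor <;> nlinarith
  refine ⟨hd, ?_⟩
  have := PySem.Int.floordiv_mul_add_mod (r * n + c) n
  rw [hd] at this
  linarith

-- the strict-orbit-minimum condition selects exactly the top-row segment of ring r
theorem pv_cond (n r c : Int) (hn : 1 ≤ n) (hr1 : 0 ≤ r) (hr2 : r < n)
    (hc1 : 0 ≤ c) (hc2 : c < n) :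
    pvP n (r * n + c) ↔ (r ≤ c ∧ c < n - 1 - r) := by
  obtain ⟨hd, hm⟩ := pv_divmod n r c hn hr1 hc1 hc2
  unfold pvP
  simp only [hd, hm]
  have e1 : (r * n + c < c * n + (n - 1) - r) ↔ (r - c) * n < n - 1 - r - c := by
    constructor <;> intro h <;> nlinarith
  have e2 : (r * n + c < (n - 1 - r) * n + (n - 1) - c) ↔ (2 * r - n + 1) * n < n - 1 - 2 * c := by
    constructor <;> intro h <;> nlinarith
  have e3 : (r * n + c < (n - 1 - c) * n + r) ↔ (r + c - n + 1) * n < r - c := by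
    constructor <;> intro h <;> nlinarith
  rw [e1, e2, e3,
    pv_mul_lt_small _ _ _ hn (by omega) (by omega),
    pv_mul_lt_small _ _ _ hn (by omega) (by omega),
    pv_mul_lt_small _ _ _ hn (by omega) (by omega)]
  omega

-- filtering a 0..m range down to the interval [a,b)
theorem pv_filter_interval (a : Int) (ha : 0 ≤ a) :
    ∀ (m : ℕ) (b : Int), b ≤ (m : Int) →
      (PySem.List.pyRange 0 (m : Int) 1).filter (fun c => decide (a ≤ c ∧ c < b))
        = PySem.List.pyRange a b 1 := by
  intro m
  induction m with
  | zero =>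
    intro b hb
    rw [show ((0 : ℕ) : Int) = 0 from rfl, PySem.List.pyRange_one_eq_nil le_rfl,
      List.filter_nil, PySem.List.pyRange_one_eq_nil (by omega)]
  | succ m ih =>
    intro b hb
    by_cases hab : b ≤ a
    · rw [PySem.List.pyRange_one_eq_nil hab, List.filter_eq_nil_iff]
      intro x _
      simp only [decide_eq_true_eq]
      omega
    · have hcast : (((m + 1 : ℕ)) : Int) = (m : Int) + 1 := by push_cast; ring
      rw [hcast, PySem.List.pyRange_one_succ_right (by positivity), List.filter_append]
      by_cases hbm : b ≤ (m : Int)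
      · rw [ih b hbm]
        have hlast : (([(m : Int)]).filter (fun c => decide (a ≤ c ∧ c < b))) = [] := by
          simp only [List.filter_cons, List.filter_nil, decide_eq_true_eq]
          rw [if_neg (by omega)]
        rw [hlast, List.append_nil]
      · have hb1 : b = (m : Int) + 1 := by omega
        have ham : a ≤ (m : Int) := by omega
        have hfc : (PySem.List.pyRange 0 (m : Int) 1).filter (fun c => decide (a ≤ c ∧ c < b))
            = (PySem.List.pyRange 0 (m : Int) 1).filter (fun c => decide (a ≤ c ∧ c < (m : Int))) := by
          apply List.filter_congr
          intro x hx
          rw [PySem.List.mem_pyRange_one] at hx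
          simp only [decide_eq_decide]
          constructor <;> intro h' <;> exact ⟨h'.1, by omega⟩
        have hlast : (([(m : Int)]).filter (fun c => decide (a ≤ c ∧ c < b))) = [(m : Int)] := by
          simp only [List.filter_cons, List.filter_nil, decide_eq_true_eq]
          rw [if_pos (by omega)]
        rw [hfc, ih (m : Int) le_rfl, hlast, hb1,
          PySem.List.pyRange_one_succ_right ham]

-- row decomposition of the flat 0..m*n scan
theorem pv_rows (n : Int) (hn : 1 ≤ n) :
    ∀ (m : ℕ), (m : Int) ≤ n →
      PySem.List.pyRange 0 ((m : Int) * n) 1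
        = ((List.range m).map
            (fun (r : ℕ) => PySem.List.pyRange ((r : Int) * n) (((r : Int) + 1) * n) 1)).flatten := by
  intro m
  induction m with
  | zero =>
    intro _
    rw [show ((0 : ℕ) : Int) * n = 0 by simp, PySem.List.pyRange_one_eq_nil le_rfl]
    simp
  | succ m ih =>
    intro hm
    have hm' : (m : Int) ≤ n := by push_cast at hm ⊢; omega
    rw [List.range_succ, List.map_append, List.flatten_append, ← ih hm']
    have hcast : (((m + 1 : ℕ)) : Int) = (m : Int) + 1 := by push_cast; ring
    rw [hcast]
    have h1 : (0 : Int) ≤ (m : Int) * n := by positivity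
    have h2 : (m : Int) * n ≤ ((m : Int) + 1) * n := by nlinarith
    rw [PySem.List.pyRange_one_append 0 ((m : Int) * n) (((m : Int) + 1) * n) h1 h2]
    simp

-- filter-then-map distributes over flatten
theorem pv_filter_map_flatten {α β : Type} (L : List (List α)) (p : α → Bool) (f : α → β) :
    (L.flatten.filter p).map f = (L.map (fun l => (l.filter p).map f)).flatten := by
  induction L with
  | nil => simp
  | cons x xs ih =>
    simp only [List.flatten_cons, List.filter_append, List.map_append, List.map_cons, ih]

-- one row of the flat scan, filtered and mapped, = ring r
theorem pv_row_scan (n : Int) (hn : 1 ≤ n) (r : ℕ) (hr : (r : Int) < n) :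
    ((PySem.List.pyRange ((r : Int) * n) (((r : Int) + 1) * n) 1).filter
        (fun idx => decide (pvP n idx))).map (pvF n)
      = (List.range (n - 1 - 2 * (r : Int)).toNat).map (fun i => pvQuad n (r : Int) i) := by
  have hr0 : (0 : Int) ≤ (r : Int) := by positivity
  have hrow : PySem.List.pyRange ((r : Int) * n) (((r : Int) + 1) * n) 1
      = (PySem.List.pyRange 0 n 1).map (fun c => (r : Int) * n + c) := by
    rw [PySem.List.pyRange_one, PySem.List.pyRange_one]
    have hd : (((r : Int) + 1) * n - (r : Int) * n).toNat = (n - 0).toNat := by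
      have : ((r : Int) + 1) * n - (r : Int) * n = n := by ring
      rw [this]
      omega
    rw [hd, List.map_map]
    apply List.map_congr_left
    intro k _
    simp only [Function.comp_apply]
    ring
  rw [hrow, List.filter_map, List.map_map]
  have hfc : (PySem.List.pyRange 0 n 1).filter
        ((fun idx => decide (pvP n idx)) ∘ (fun c => (r : Int) * n + c))
      = (PySem.List.pyRange 0 n 1).filter (fun c => decide ((r : Int) ≤ c ∧ c < n - 1 - (r : Int))) := by
    apply List.filter_congr
    intro c hc
    rw [PySem.List.mem_pyRange_one] at hc
    simp only [Function.comp_apply, decide_eq_decide]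
    exact pv_cond n (r : Int) c hn hr0 hr hc.1 hc.2
  rw [hfc]
  have hcast : ((n.toNat : ℕ) : Int) = n := by omega
  have hfi := pv_filter_interval (r : Int) hr0 n.toNat (n - 1 - (r : Int)) (by omega)
  rw [hcast] at hfi
  rw [hfi]
  have hmap : (PySem.List.pyRange (r : Int) (n - 1 - (r : Int)) 1).map
        ((pvF n) ∘ (fun c => (r : Int) * n + c))
      = (PySem.List.pyRange (r : Int) (n - 1 - (r : Int)) 1).map
        (fun c => [(r : Int) * n + c, c * n + (n - 1 - (r : Int)),
          (n - 1 - (r : Int)) * n + (n - 1 - c), (n - 1 - c) * n + (r : Int)]) := by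
    apply List.map_congr_left
    intro c hc
    rw [PySem.List.mem_pyRange_one] at hc
    obtain ⟨hd, hm⟩ := pv_divmod n (r : Int) c hn hr0 (by omega) (by omega)
    simp only [Function.comp_apply, pvF, hd, hm]
    refine congrArg₂ _ rfl (congrArg₂ _ (by ring) (congrArg₂ _ (by ring)
      (congrArg₂ _ (by ring) rfl)))
  rw [hmap]
  exact pv_row_map n (r : Int) hr0

-- B equals pvRings from ring 0
theorem pv_alt_eq (n : Int) : determine_key_alt n = pvRings n 0 := by
  rw [determine_key_alt]
  by_cases hn : n < 1
  · rw [if_pos hn, pvRings, dif_neg (by omega)]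
  · have hn' : 1 ≤ n := by omega
    rw [if_neg hn, pv_fold_filterB, List.nil_append]
    have hcast : ((n.toNat : ℕ) : Int) = n := by omega
    have hnn : n * n = ((n.toNat : ℕ) : Int) * n := by rw [hcast]
    rw [hnn, pv_rows n hn' n.toNat (by omega), pv_filter_map_flatten, List.map_map]
    have hrows : (List.range n.toNat).map
          ((fun l => (l.filter (fun idx => decide (pvP n idx))).map (pvF n)) ∘
            (fun (r : ℕ) => PySem.List.pyRange ((r : Int) * n) (((r : Int) + 1) * n) 1))
        = (List.range n.toNat).map
          (fun (r : ℕ) => (List.range (n - 1 - 2 * (r : Int)).toNat).map (fun i => pvQuad n (r : Int) i)) := by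
      apply List.map_congr_left
      intro r hrm
      rw [List.mem_range] at hrm
      exact pv_row_scan n hn' r (by omega)
    rw [hrows, List.range_eq_range']
    exact pv_flat_rings n hn' n.toNat 0 (by omega)

-- ===== VERDICT (by name: the statement is the Claim_ definition above) =====
theorem determine_key_spec : Claim_equal_determine_key := by
  intro size _
  unfold Spec_determine_key
  rw [pv_alt_eq size]
  have h := pv_whileA_eq size 0 le_rfl [] 0
  simp only [zero_mul, Int.sub_zero, mul_zero, List.nil_append] at h
  rw [determine_key]
  norm_num at h
  exact h
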